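-- pv_equiv track=rewrite | github.com/algoboost5/Algorithm | [프로그래머스] 위클리 챌린지/[프로그래머스]챌린지_4주차_박준혁.py | solution
-- ===== SOURCE A (Python) =====
-- def solution(table, languages, preference):  # 모두 list 로 입력됨 , table은 모든 테스트케이스에서 동일합니다.
--     # table_list = []
--     for x in range(len(table)):
--         table[x] = table[x].split()
--
--
--     answer = ''
--     max_num = 0
--     leader = []
--
--     for i in range(5): #table 의 길이 5 고정
--         score = 0
--         for j in range(len(languages)):
--             if languages[j] in table[i]:
--                 score += preference[j] * (6-table[i].index(languages[j]))
--
--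
--         if score > max_num:
--             max_num = score
--             leader = [table[i][0]]
--
--         elif score == max_num:
--             max_num = score
--             leader.append(table[i][0])
--
--     return sorted(leader)[0]
-- ===== SOURCE B (Python) =====
-- def solution(table, languages, preference):
--     # same in-place mutation as A: each table row becomes its word list
--     for x in range(len(table)):
--         table[x] = table[x].split()
--     # invert A's loops: total preference per language, built once
--     pref = {}
--     for lang, p in zip(languages, preference):
--         pref[lang] = pref.get(lang, 0) + p
--     # running lexicographic minimum of (-score, first word) keys
--     best = None
--     for i in range(5):
--         row = table[i]
--         seen = set()
--         score = 0
--         for k in range(len(row)):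
--             w = row[k]
--             if w not in seen:
--                 seen.add(w)
--                 score += pref.get(w, 0) * (6 - k)
--         key = (-score, row[0])
--         if best is None or key < best:
--             best = key
--     return best[1]
-- ===== Notes on version B (the rewrite author's own statement) =====
-- stated objective: alternative
-- what changed: A scans the languages list against each row (membership test plus .index rescan) and keeps a running max with a leader list it sorts at the end; B inverts the loops: it builds one language->summed-preference dict, scores each row by a single left-to-right scan over the row's words with a seen-set (first occurrences only, O(1) dict lookups), and keeps a running lexicographic minimum of (-score, first_word) keys, returning its word - no repeated row scans, no leader list, no sort.
-- outside the precondition, e.g. on solution(['a b', 'c', 'x', '', 'q'], ['b'], [3]): A returns 'a', B raises IndexError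
import Mathlib
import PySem

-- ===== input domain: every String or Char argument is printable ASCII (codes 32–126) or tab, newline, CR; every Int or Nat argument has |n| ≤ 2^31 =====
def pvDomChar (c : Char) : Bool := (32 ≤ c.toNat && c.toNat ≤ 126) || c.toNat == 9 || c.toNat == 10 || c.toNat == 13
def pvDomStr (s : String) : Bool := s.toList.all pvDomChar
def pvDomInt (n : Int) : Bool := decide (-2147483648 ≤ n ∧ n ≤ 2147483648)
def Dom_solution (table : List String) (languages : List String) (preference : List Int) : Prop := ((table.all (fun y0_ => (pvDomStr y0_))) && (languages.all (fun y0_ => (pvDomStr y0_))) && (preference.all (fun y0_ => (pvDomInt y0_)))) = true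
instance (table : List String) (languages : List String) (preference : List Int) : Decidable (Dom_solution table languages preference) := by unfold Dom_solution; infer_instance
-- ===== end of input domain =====

-- B inverts A's loops: one language->summed-preference dict, one seen-set scan per row,
-- and a running lexicographic minimum of (-score, first word) keys instead of A's running
-- max + leader list + sort; objective: alternative. Both A and B mutate `table` in place
-- (each row is replaced by its word list); the equivalence proved here is about the
-- RETURN value only.

-- ===== PORT A =====
-- inner loop of A: for j in range(len(languages)): if languages[j] in table[i]: score += preference[j]*(6-table[i].index(languages[j]))
def scoreA (languages : List String) (preference : List Int) (row : List String) : Int :=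
  (PySem.List.pyRange 0 (languages.length : Int) 1).foldl (fun score j =>
    if PySem.List.pyGetD languages j "" ∈ row then
      score + PySem.List.pyGetD preference j 0 *
        (6 - ((PySem.List.index? row (PySem.List.pyGetD languages j "")).getD 0 : Int))
    else score) 0

def solution (table : List String) (languages : List String) (preference : List Int) : String :=
  let table2 := table.map PySem.Str.split₀
  let st := (PySem.List.pyRange 0 5 1).foldl (fun (st : Int × List String) i =>
      let row := PySem.List.pyGetD table2 i []
      let score := scoreA languages preference row
      if score > st.1 then (score, [PySem.List.pyGetD row 0 ""])
      else if score = st.1 then (score, st.2 ++ [PySem.List.pyGetD row 0 ""])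
      else st) (0, [])
  PySem.List.pyGetD (PySem.List.sorted st.2 (fun x => x) false) 0 ""

-- ===== PORT B =====
-- for lang, p in zip(languages, preference): pref[lang] = pref.get(lang, 0) + p
def prefDictB (languages : List String) (preference : List Int) : PySem.Dict String Int :=
  (languages.zip preference).foldl (fun d lp => d.insert lp.1 (d.getD lp.1 0 + lp.2)) PySem.Dict.empty

-- inner loop of B: seen-set + running score over the row's positions
def rowScoreB (pref : PySem.Dict String Int) (row : List String) : Int :=
  ((PySem.List.pyRange 0 (row.length : Int) 1).foldl (fun (st : PySem.Set String × Int) k =>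
      let w := PySem.List.pyGetD row k ""
      if PySem.Set.contains st.1 w then st
      else (PySem.Set.add st.1 w, st.2 + pref.getD w 0 * (6 - k))) (PySem.Set.empty, 0)).2

def solution_alt (table : List String) (languages : List String) (preference : List Int) : String :=
  let table2 := table.map PySem.Str.split₀
  let pref := prefDictB languages preference
  let best := (PySem.List.pyRange 0 5 1).foldl (fun (best : Option (Int × String)) i =>
      let row := PySem.List.pyGetD table2 i []
      let key : Int × String := (-(rowScoreB pref row), PySem.List.pyGetD row 0 "")
      match best with
      | none => some key
      | some b => if key.1 < b.1 ∨ (key.1 = b.1 ∧ key.2 < b.2) then some key else some b) none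
  (best.getD (0, "")).2

-- ===== PRECONDITION & SPEC =====
-- closed-form score of one (already split) row, used only by Pre_
def preScore (languages : List String) (preference : List Int) (ws : List String) : Int :=
  ((languages.zip preference).map (fun lp =>
    match PySem.List.index? ws lp.1 with
    | some k => lp.2 * (6 - (k : Int))
    | none => 0)).sum

-- Pre_ excludes exactly: fewer than 5 table rows (A's table[i] raises IndexError); a language that
-- occurs in one of the first five rows but has no preference entry (A's preference[j] raises
-- IndexError); all five row scores negative (A's sorted([])[0] raises IndexError); and —
-- conservatively — a whitespace-only row among the first five, on some of which A (and B) raise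
-- IndexError at row[0] while on others A still returns a value.
def Pre_solution (table : List String) (languages : List String) (preference : List Int) : Prop :=
  5 ≤ table.length ∧
  (∀ s ∈ table.take 5, PySem.Str.split₀ s ≠ []) ∧
  (∀ j, (hj : j < languages.length) → (∃ s ∈ table.take 5, languages[j] ∈ PySem.Str.split₀ s) →
      j < preference.length) ∧
  (∃ s ∈ table.take 5, 0 ≤ preScore languages preference (PySem.Str.split₀ s))
instance (table : List String) (languages : List String) (preference : List Int) : Decidable (Pre_solution table languages preference) := by unfold Pre_solution; infer_instance

def pvWitness_solution : List String × List String × List Int :=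
  (["jm PYTHON CPP", "tk JAVA C", "pj C RUBY", "aa GO", "bb JAVA"], ["PYTHON", "C"], [4, 3])

def Spec_solution (table : List String) (languages : List String) (preference : List Int) (out : String) : Prop := out = solution_alt table languages preference
instance (table : List String) (languages : List String) (preference : List Int) (out : String) : Decidable (Spec_solution table languages preference out) := by unfold Spec_solution; infer_instance

-- ===== CLAIM (what is proved, stated in full; the proofs are below) =====
def Claim_equal_solution : Prop := ∀ (table : List String) (languages : List String) (preference : List Int), Dom_solution table languages preference → Pre_solution table languages preference → Spec_solution table languages preference (solution table languages preference)

-- ===== LEMMAS AND PROOFS =====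

-- A's running-max step, on (score, first word) pairs
def stepA (st : Int × List String) (p : Int × String) : Int × List String :=
  if p.1 > st.1 then (p.1, [p.2])
  else if p.1 = st.1 then (p.1, st.2 ++ [p.2]) else st

-- B's running-min step on (-score, word) keys
def minK (b k : Int × String) : Int × String :=
  if k.1 < b.1 ∨ (k.1 = b.1 ∧ k.2 < b.2) then k else b

-- the invariant of A's running-max/reset/append loop
lemma foldA_eq : ∀ (ps : List (Int × String)) (m : Int) (L : List String),
    ps.foldl stepA (m, L) =
      ((ps.map Prod.fst).foldl max m,
        (if (ps.map Prod.fst).foldl max m = m then L else []) ++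
          (ps.filter (fun p => p.1 == (ps.map Prod.fst).foldl max m)).map Prod.snd) := by
  intro ps
  induction ps with
  | nil => intro m L; simp
  | cons p rest ih =>
    intro m L
    simp only [List.foldl_cons, List.map_cons, List.filter_cons]
    rcases lt_trichotomy m p.1 with h | h | h
    · have hstep : stepA (m, L) p = (p.1, [p.2]) := by simp [stepA, h]
      have hmax : max m p.1 = p.1 := by omega
      rw [hstep, ih p.1 [p.2]]
      simp only [hmax]
      have hle := (PySem.List.le_foldl_max (rest.map Prod.fst) p.1).1
      have hM : ¬ ((rest.map Prod.fst).foldl max p.1 = m) := by omega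
      rw [if_neg hM]
      by_cases hp : p.1 = (rest.map Prod.fst).foldl max p.1
      · rw [if_pos ((beq_iff_eq).mpr hp), if_pos hp.symm]
        simp
      · rw [if_neg (fun hh => hp hh.symm), if_neg (by simpa using hp)]
    · subst h
      have hstep : stepA (p.1, L) p = (p.1, L ++ [p.2]) := by simp [stepA]
      have hmax : max p.1 p.1 = p.1 := by omega
      rw [hstep, ih p.1 (L ++ [p.2])]
      simp only [hmax]
      by_cases hp : (rest.map Prod.fst).foldl max p.1 = p.1
      · rw [if_pos hp, if_pos hp, if_pos ((beq_iff_eq).mpr hp.symm)]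
        simp
      · rw [if_neg hp, if_neg hp, if_neg (by simpa using fun hh => hp hh.symm)]
    · have hstep : stepA (m, L) p = (m, L) := by
        simp [stepA, show ¬ p.1 > m by omega, show p.1 ≠ m by omega]
      have hmax : max m p.1 = m := by omega
      rw [hstep, ih m L]
      simp only [hmax]
      have hle := (PySem.List.le_foldl_max (rest.map Prod.fst) m).1
      rw [if_neg (show ¬ ((p.1 == (rest.map Prod.fst).foldl max m) = true) by
        simp only [beq_iff_eq]; omega)]

-- lexicographic ≤ on (-score, word) keys
def lexLe (a b : Int × String) : Prop := a.1 < b.1 ∨ (a.1 = b.1 ∧ a.2 ≤ b.2)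

lemma minK_cases (b k : Int × String) : minK b k = b ∨ minK b k = k := by
  unfold minK; split_ifs <;> simp

lemma lexLe_minK_left (b k : Int × String) : lexLe (minK b k) b := by
  unfold minK lexLe
  split_ifs with h
  · rcases h with h | ⟨h1, h2⟩
    · exact Or.inl h
    · exact Or.inr ⟨h1, le_of_lt h2⟩
  · exact Or.inr ⟨rfl, le_refl _⟩

lemma lexLe_minK_right (b k : Int × String) : lexLe (minK b k) k := by
  unfold minK lexLe
  split_ifs with h
  · exact Or.inr ⟨rfl, le_refl _⟩
  · push_neg at h
    obtain ⟨ha, hb2⟩ := h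
    rcases lt_or_eq_of_le ha with h1 | h1
    · exact Or.inl h1
    · exact Or.inr ⟨h1, hb2 h1.symm⟩

lemma lexLe_trans {a b c : Int × String} (h1 : lexLe a b) (h2 : lexLe b c) : lexLe a c := by
  unfold lexLe at *
  rcases h1 with h1 | ⟨e1, l1⟩ <;> rcases h2 with h2 | ⟨e2, l2⟩
  · exact Or.inl (by omega)
  · exact Or.inl (by omega)
  · exact Or.inl (by omega)
  · exact Or.inr ⟨by omega, le_trans l1 l2⟩

-- the running minimum is a member and a lower bound
lemma foldl_minK_mem : ∀ (ks : List (Int × String)) (b : Int × String),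
    ks.foldl minK b = b ∨ ks.foldl minK b ∈ ks := by
  intro ks
  induction ks with
  | nil => intro b; simp
  | cons k rest ih =>
    intro b
    simp only [List.foldl_cons]
    rcases ih (minK b k) with h | h
    · rcases minK_cases b k with hc | hc
      · left; rw [h, hc]
      · right; rw [h, hc]; simp
    · right; simp [h]

lemma foldl_minK_le : ∀ (ks : List (Int × String)) (b : Int × String),
    lexLe (ks.foldl minK b) b ∧ ∀ k ∈ ks, lexLe (ks.foldl minK b) k := by
  intro ks
  induction ks with
  | nil =>
    intro b
    refine ⟨Or.inr ⟨rfl, le_refl _⟩, by simp⟩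
  | cons k rest ih =>
    intro b
    simp only [List.foldl_cons]
    obtain ⟨h1, h2⟩ := ih (minK b k)
    refine ⟨lexLe_trans h1 (lexLe_minK_left b k), ?_⟩
    intro k' hk'
    rcases List.mem_cons.mp hk' with rfl | hk'
    · exact lexLe_trans h1 (lexLe_minK_right b k')
    · exact h2 k' hk'

-- B's loop step on the optional running minimum
def stepOpt (best : Option (Int × String)) (k : Int × String) : Option (Int × String) :=
  match best with
  | none => some k
  | some b => if k.1 < b.1 ∨ (k.1 = b.1 ∧ k.2 < b.2) then some k else some b

-- B's optional running minimum collapses to foldl minK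
lemma optFold : ∀ (ks : List (Int × String)) (b : Int × String),
    ks.foldl stepOpt (some b) = some (ks.foldl minK b) := by
  intro ks
  induction ks with
  | nil => intro b; rfl
  | cons k rest ih =>
    intro b
    simp only [List.foldl_cons]
    rw [show stepOpt (some b) k = some (minK b k) from by
      simp only [stepOpt, minK]; split_ifs <;> rfl]
    exact ih (minK b k)

-- ---- inner score: A's language scan = B's seen-set row scan ----

-- first occurrences of the row's words (position, word), skipping an initial seen set
def firstOccs (seen : PySem.Set String) (n : Int) : List String → List (Int × String)
  | [] => []
  | w :: ws =>
    if PySem.Set.contains seen w then firstOccs seen (n + 1) ws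
    else (n, w) :: firstOccs (PySem.Set.add seen w) (n + 1) ws

-- B's seen-set fold sums over the first occurrences
lemma seen_fold (pref : PySem.Dict String Int) : ∀ (ws : List String) (n : Int)
    (S : PySem.Set String) (c : Int),
    ((PySem.List.enumerate ws n).foldl (fun (st : PySem.Set String × Int) p =>
      if PySem.Set.contains st.1 p.2 then st
      else (PySem.Set.add st.1 p.2, st.2 + pref.getD p.2 0 * (6 - p.1))) (S, c)).2
    = c + ((firstOccs S n ws).map (fun p => pref.getD p.2 0 * (6 - p.1))).sum := by
  intro ws
  induction ws with
  | nil => intro n S c; simp [PySem.List.enumerate_nil, firstOccs]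
  | cons w rest ih =>
    intro n S c
    rw [PySem.List.enumerate_cons]
    simp only [List.foldl_cons, firstOccs]
    by_cases hc : PySem.Set.contains S w
    · rw [if_pos hc, if_pos hc, ih]
    · rw [if_neg hc, if_neg hc, ih]
      simp only [List.map_cons, List.sum_cons]
      ring

-- sum of a single-language selector over the first occurrences = first index of that language
lemma firstOccs_select (e : Int → Int) (l : String) : ∀ (ws : List String)
    (S : PySem.Set String) (n : Int),
    ((firstOccs S n ws).map (fun p => if p.2 = l then e p.1 else 0)).sum
    = if l ∈ S then 0 else
        match PySem.List.index? ws l with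
        | some k => e (n + k)
        | none => 0 := by
  intro ws
  induction ws with
  | nil =>
    intro S n
    rw [(PySem.List.index?_eq_none_iff ([] : List String) l).mpr (by simp)]
    simp [firstOccs]
  | cons w rest ih =>
    intro S n
    by_cases hw : w = l
    · subst hw
      rw [PySem.List.index?_cons_self]
      by_cases hS : w ∈ S
      · simp only [firstOccs]
        rw [if_pos ((PySem.Set.contains_iff S w).mpr hS)]
        rw [ih S (n + 1)]
        simp [hS]
      · simp only [firstOccs]
        rw [if_neg (show ¬ (PySem.Set.contains S w = true) from fun h => hS ((PySem.Set.contains_iff _ _).mp h))]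
        simp only [List.map_cons, List.sum_cons]
        rw [ih (PySem.Set.add S w) (n + 1)]
        rw [if_pos (by simp)]
        simp [hS]
    · rw [PySem.List.index?_cons_of_ne _ hw]
      by_cases hS : w ∈ S
      · simp only [firstOccs]
        rw [if_pos ((PySem.Set.contains_iff S w).mpr hS)]
        rw [ih S (n + 1)]
        by_cases hl : l ∈ S
        · simp [hl]
        · simp only [if_neg hl]
          cases PySem.List.index? rest l with
          | none => simp
          | some k => simp; ring_nf
      · simp only [firstOccs]
        rw [if_neg (show ¬ (PySem.Set.contains S w = true) from fun h => hS ((PySem.Set.contains_iff _ _).mp h))]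
        simp only [List.map_cons, List.sum_cons, if_neg hw]
        rw [ih (PySem.Set.add S w) (n + 1)]
        by_cases hl : l ∈ S
        · rw [if_pos (by simp [PySem.Set.mem_add, hl]), if_pos hl]
          simp
        · have : ¬ l ∈ PySem.Set.add S w := by
            simp [PySem.Set.mem_add, hl]
            exact fun h => hw h.symm
          rw [if_neg this, if_neg hl]
          cases PySem.List.index? rest l with
          | none => simp
          | some k => simp; ring_nf

-- the preference dict sums all matching zip entries
lemma prefDict_getD : ∀ (Z : List (String × Int)) (d : PySem.Dict String Int) (w : String),
    ((Z.foldl (fun d lp => d.insert lp.1 (d.getD lp.1 0 + lp.2)) d).getD w 0)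
    = d.getD w 0 + ((Z.map (fun lp => if lp.1 = w then lp.2 else 0)).sum) := by
  intro Z
  induction Z with
  | nil => intro d w; simp
  | cons lp rest ih =>
    intro d w
    simp only [List.foldl_cons, List.map_cons, List.sum_cons]
    rw [ih]
    rw [PySem.Dict.getD_insert]
    by_cases h : w = lp.1
    · subst h; simp; ring
    · rw [if_neg h, if_neg (fun hh => h hh.symm)]
      ring

-- exchange of summation: sum over first occurrences of dict totals = sum over zip entries
lemma exchange (row : List String) :
    ∀ (Z : List (String × Int)),
    ((firstOccs PySem.Set.empty 0 row).map (fun p =>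
        ((Z.map (fun lp => if lp.1 = p.2 then lp.2 else 0)).sum) * (6 - p.1))).sum
    = ((Z.map (fun lp =>
        match PySem.List.index? row lp.1 with
        | some k => lp.2 * (6 - (k : Int))
        | none => 0)).sum) := by
  intro Z
  induction Z with
  | nil => simp
  | cons lp rest ih =>
    simp only [List.map_cons, List.sum_cons]
    have hsplit : (fun (p : Int × String) =>
        ((if lp.1 = p.2 then lp.2 else 0) + ((rest.map (fun lq => if lq.1 = p.2 then lq.2 else 0)).sum)) * (6 - p.1))
        = (fun (p : Int × String) =>
          (if p.2 = lp.1 then lp.2 * (6 - p.1) else 0) +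
          ((rest.map (fun lq => if lq.1 = p.2 then lq.2 else 0)).sum) * (6 - p.1)) := by
      funext p
      by_cases h : lp.1 = p.2
      · rw [if_pos h, if_pos h.symm]; ring
      · rw [if_neg h, if_neg (fun hh => h hh.symm)]; ring
    rw [hsplit]
    rw [PySem.List.sum_map_add_int]
    rw [ih]
    congr 1
    rw [firstOccs_select (fun k => lp.2 * (6 - k)) lp.1 row PySem.Set.empty 0]
    rw [if_neg (by simp [PySem.Set.empty])]
    cases PySem.List.index? row lp.1 with
    | none => simp
    | some k => simp

-- B's row score = the closed-form preScore
lemma rowScoreB_eq_pre (languages : List String) (preference : List Int) (row : List String) :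
    rowScoreB (prefDictB languages preference) row = preScore languages preference row := by
  unfold rowScoreB
  have hlenr : PySem.List.len row = (row.length : Int) := by simp [PySem.List.len_eq]
  have henum : (PySem.List.pyRange 0 (row.length : Int) 1).foldl (fun (st : PySem.Set String × Int) k =>
      if PySem.Set.contains st.1 (PySem.List.pyGetD row k "") then st
      else (PySem.Set.add st.1 (PySem.List.pyGetD row k ""),
            st.2 + (prefDictB languages preference).getD (PySem.List.pyGetD row k "") 0 * (6 - k)))
      (PySem.Set.empty, 0)
      = (PySem.List.enumerate row ((0:Nat) : Int)).foldl (fun (st : PySem.Set String × Int) p =>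
      if PySem.Set.contains st.1 p.2 then st
      else (PySem.Set.add st.1 p.2, st.2 + (prefDictB languages preference).getD p.2 0 * (6 - p.1)))
      (PySem.Set.empty, 0) := by
    rw [show (((0:Nat)):Int) = (0:Int) by norm_num]
    rw [PySem.List.enumerate_eq_map_pyRange row "", List.foldl_map, hlenr]
  simp only [henum]
  rw [seen_fold]
  have hmap : (fun (p : Int × String) => (prefDictB languages preference).getD p.2 0 * (6 - p.1))
      = (fun (p : Int × String) =>
          (((languages.zip preference).map (fun lp => if lp.1 = p.2 then lp.2 else 0)).sum) * (6 - p.1)) := by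
    funext p
    unfold prefDictB
    rw [prefDict_getD]
    simp
  simp only [Nat.cast_zero]
  rw [hmap, exchange row (languages.zip preference)]
  simp [preScore]

-- A's inner loop = the closed-form preScore
lemma scoreA_eq_pre (row : List String) : ∀ (langs : List String) (n : Nat) (pref : List Int) (c : Int),
    (PySem.List.enumerate langs (n : Int)).foldl (fun score p =>
      if p.2 ∈ row then
        score + PySem.List.pyGetD pref p.1 0 * (6 - ((PySem.List.index? row p.2).getD 0 : Int))
      else score) c
    = c + preScore langs (pref.drop n) row := by
  intro langs
  induction langs with
  | nil => intro n pref c; simp [preScore, PySem.List.enumerate_nil]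
  | cons l ls ih =>
    intro n pref c
    rw [PySem.List.enumerate_cons]
    simp only [List.foldl_cons]
    have hcast : ((n : Int) + 1) = ((n + 1 : Nat) : Int) := by push_cast; ring
    have hget : PySem.List.pyGetD pref (n : Int) 0 = (pref.drop n).head?.getD 0 := by
      rw [PySem.List.pyGetD_natCast, List.head?_drop]
      rfl
    have hd1 : pref.drop (n + 1) = (pref.drop n).tail := by
      rw [← List.tail_drop]
    by_cases hm : l ∈ row
    · rw [if_pos hm]
      rcases Option.isSome_iff_exists.mp ((PySem.List.index?_isSome_iff row l).mpr hm) with ⟨k, hk⟩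
      have hix' : List.idxOf? l row = some k := by simpa using hk
      rw [hcast, ih (n + 1) pref, hd1, hget]
      cases hd : pref.drop n with
      | nil => simp [preScore, hix']
      | cons p restp =>
        simp [preScore, hix', List.zip_cons_cons]
        ring
    · rw [if_neg hm]
      have hix' : List.idxOf? l row = none := by
        simpa using (PySem.List.index?_eq_none_iff row l).mpr hm
      rw [hcast, ih (n + 1) pref, hd1]
      cases hd : pref.drop n with
      | nil => simp [preScore]
      | cons p restp => simp [preScore, hix', List.zip_cons_cons]

lemma scoreA_eq_rowScoreB (languages : List String) (preference : List Int) (row : List String) :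
    scoreA languages preference row = rowScoreB (prefDictB languages preference) row := by
  rw [rowScoreB_eq_pre]
  unfold scoreA
  have hlen : PySem.List.len languages = (languages.length : Int) := by simp [PySem.List.len_eq]
  have henum : (PySem.List.pyRange 0 (languages.length : Int) 1).foldl (fun score j =>
      if PySem.List.pyGetD languages j "" ∈ row then
        score + PySem.List.pyGetD preference j 0 *
          (6 - ((PySem.List.index? row (PySem.List.pyGetD languages j "")).getD 0 : Int))
      else score) 0
      = (PySem.List.enumerate languages ((0:Nat) : Int)).foldl (fun score p =>
          if p.2 ∈ row then
            score + PySem.List.pyGetD preference p.1 0 *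
              (6 - ((PySem.List.index? row p.2).getD 0 : Int))
          else score) 0 := by
    rw [show (((0:Nat)):Int) = (0:Int) by norm_num]
    rw [PySem.List.enumerate_eq_map_pyRange languages "", List.foldl_map, hlen]
  rw [henum, scoreA_eq_pre row languages 0 preference 0]
  simp

-- ---- outer loop: A's max/leader/sort = B's running lexicographic minimum ----
lemma outer (q : Int × String) (qs : List (Int × String))
    (hex : ∃ p ∈ q :: qs, 0 ≤ p.1) :
    PySem.List.pyGetD (PySem.List.sorted (((q :: qs).foldl stepA ((0 : Int), ([] : List String))).2)
        (fun x => x) false) 0 ""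
    = ((qs.map (fun p => (-p.1, p.2))).foldl minK (-q.1, q.2)).2 := by
  set ps := q :: qs with hps
  rw [foldA_eq]
  set M := (ps.map Prod.fst).foldl max 0 with hM
  set leader := (ps.filter (fun p => p.1 == M)).map Prod.snd with hleader
  have hub : ∀ p ∈ ps, p.1 ≤ M := by
    intro p hp
    exact (PySem.List.le_foldl_max (ps.map Prod.fst) 0).2 p.1 (List.mem_map_of_mem hp)
  have hMmem : ∃ p ∈ ps, p.1 = M := by
    rcases PySem.List.foldl_max_mem (ps.map Prod.fst) 0 with h0 | hmem
    · obtain ⟨p, hp, hp0⟩ := hex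
      exact ⟨p, hp, le_antisymm (hub p hp) (by omega)⟩
    · obtain ⟨p, hp, hpe⟩ := List.mem_map.mp hmem
      exact ⟨p, hp, hpe⟩
  obtain ⟨pM, hpM, hpMe⟩ := hMmem
  have hleadne : leader ≠ [] := by
    rw [hleader]
    intro h
    have : pM.2 ∈ (ps.filter (fun p => p.1 == M)).map Prod.snd :=
      List.mem_map_of_mem (List.mem_filter.mpr ⟨hpM, by simpa using hpMe⟩)
    rw [h] at this
    exact absurd this (List.not_mem_nil)
  -- head of the sorted leader
  obtain ⟨h, t, hsort⟩ : ∃ h t, PySem.List.sorted leader (fun x => x) false = h :: t := by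
    cases hs : PySem.List.sorted leader (fun x => x) false with
    | nil => exact absurd ((PySem.List.sorted_eq_nil_iff _ _ _).mp hs) hleadne
    | cons h t => exact ⟨h, t, rfl⟩
  have hhmem : h ∈ leader := (PySem.List.mem_sorted _ _ _ _).mp (by rw [hsort]; simp)
  have hhle : ∀ y ∈ leader, h ≤ y := fun y hy => by
    simpa using PySem.List.key_head_sorted_le _ _ hsort y hy
  -- B's minimum
  set b := (qs.map (fun p => (-p.1, p.2))).foldl minK (-q.1, q.2) with hb
  have hbmem : ∃ p ∈ ps, b = (-p.1, p.2) := by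
    rcases foldl_minK_mem (qs.map (fun p => (-p.1, p.2))) (-q.1, q.2) with hc | hc
    · exact ⟨q, by simp [hps], hc⟩
    · obtain ⟨p, hp, hpe⟩ := List.mem_map.mp hc
      exact ⟨p, by simp [hps, hp], hpe.symm⟩
  have hble : ∀ p ∈ ps, lexLe b (-p.1, p.2) := by
    intro p hp
    rcases List.mem_cons.mp (hps ▸ hp) with rfl | hp'
    · exact (foldl_minK_le _ _).1
    · exact (foldl_minK_le _ _).2 _ (List.mem_map_of_mem hp')
  obtain ⟨pb, hpb, hpbe⟩ := hbmem
  have hpbM : pb.1 = M := by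
    refine le_antisymm (hub pb hpb) ?_
    have hlex := hble pM hpM
    rw [hpbe] at hlex
    rcases hlex with hlt | ⟨heq, _⟩
    · have h1 : -pb.1 < -pM.1 := hlt
      omega
    · have h1 : -pb.1 = -pM.1 := heq
      omega
  have hbleader : b.2 ∈ leader := by
    have hmem : pb.2 ∈ leader := by
      rw [hleader]
      exact List.mem_map_of_mem (List.mem_filter.mpr ⟨hpb, by simpa using hpbM⟩)
    rw [hpbe]
    exact hmem
  -- h ≤ b.2 and b.2 ≤ h
  have hhb : h ≤ b.2 := hhle _ hbleader
  have hbh : b.2 ≤ h := by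
    obtain ⟨ph, hph, hphM, hphh⟩ : ∃ p ∈ ps, p.1 = M ∧ p.2 = h := by
      rw [hleader] at hhmem
      obtain ⟨p, hp, hpe⟩ := List.mem_map.mp hhmem
      exact ⟨p, (List.mem_filter.mp hp).1, by simpa using (List.mem_filter.mp hp).2, hpe⟩
    have hlex := hble ph hph
    rw [hpbe] at hlex
    rcases hlex with hlt | ⟨heq, hle2⟩
    · have h1 : -pb.1 < -ph.1 := hlt
      omega
    · have h1 : pb.2 ≤ ph.2 := hle2
      rw [hpbe, ← hphh]
      exact h1
  simp only [ite_self, List.nil_append]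
  rw [hsort]
  have : h = b.2 := le_antisymm hhb hbh
  simp [PySem.List.pyGetD, this]

-- row i of the split table and A's (score, first word) pair for it (proof-only abbreviations)
def pvRow (table : List String) (i : Int) : List String :=
  PySem.List.pyGetD (table.map PySem.Str.split₀) i []

def pvP (table : List String) (languages : List String) (preference : List Int) (i : Int) :
    Int × String :=
  (scoreA languages preference (pvRow table i), PySem.List.pyGetD (pvRow table i) 0 "")

-- B's loop over indices is the stepOpt fold over the keys
lemma bfold_eq (f : Int → Int × String) (l : List Int) :
    l.foldl (fun (best : Option (Int × String)) i =>
      match best with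
      | none => some (f i)
      | some b => if (f i).1 < b.1 ∨ ((f i).1 = b.1 ∧ (f i).2 < b.2) then some (f i) else some b)
      none
    = (l.map f).foldl stepOpt none := by
  rw [List.foldl_map]
  rfl

-- ===== VERDICT (by name: the statement is the Claim_ definition above) =====
theorem solution_spec : Claim_equal_solution := by
  intro table languages preference hdom hpre
  unfold Spec_solution
  obtain ⟨h5, hrows, hplen, r, hr, hscore⟩ := hpre
  simp only [solution, solution_alt]
  have h5r : PySem.List.pyRange 0 5 1 = [0, 1, 2, 3, 4] := by decide
  rw [h5r]
  -- A's loop body is stepA on pvP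
  rw [show (fun (st : Int × List String) (i : Int) =>
      if scoreA languages preference (PySem.List.pyGetD (table.map PySem.Str.split₀) i []) > st.1 then
        (scoreA languages preference (PySem.List.pyGetD (table.map PySem.Str.split₀) i []),
          [PySem.List.pyGetD (PySem.List.pyGetD (table.map PySem.Str.split₀) i []) 0 ""])
      else if scoreA languages preference (PySem.List.pyGetD (table.map PySem.Str.split₀) i []) = st.1 then
        (scoreA languages preference (PySem.List.pyGetD (table.map PySem.Str.split₀) i []),
          st.2 ++ [PySem.List.pyGetD (PySem.List.pyGetD (table.map PySem.Str.split₀) i []) 0 ""])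
      else st)
    = (fun st i => stepA st (pvP table languages preference i))
    from by funext st i; simp [stepA, pvP, pvRow]]
  rw [← List.foldl_map]
  -- B's loop body is stepOpt on the keys, and each key is built from pvP
  rw [bfold_eq (fun i =>
      ((-(rowScoreB (prefDictB languages preference)
          (PySem.List.pyGetD (table.map PySem.Str.split₀) i [])),
        PySem.List.pyGetD (PySem.List.pyGetD (table.map PySem.Str.split₀) i []) 0 "") : Int × String))]
  rw [show (fun (i : Int) =>
      ((-(rowScoreB (prefDictB languages preference)
          (PySem.List.pyGetD (table.map PySem.Str.split₀) i [])),
        PySem.List.pyGetD (PySem.List.pyGetD (table.map PySem.Str.split₀) i []) 0 "") : Int × String))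
    = (fun i => ((-(pvP table languages preference i).1, (pvP table languages preference i).2) : Int × String))
    from by funext i; simp [pvP, pvRow, scoreA_eq_rowScoreB]]
  -- precondition: some of the five scores is nonnegative
  obtain ⟨k, hk, hkr⟩ := List.mem_iff_getElem.mp hr
  have hk5 : k < 5 := by
    have := hk; simp [List.length_take] at this; omega
  have hkl : k < table.length := by omega
  have hrowk : pvRow table ((k : Nat) : Int) = PySem.Str.split₀ r := by
    unfold pvRow
    rw [PySem.List.pyGetD_natCast]
    rw [List.getD_eq_getElem?_getD, List.getElem?_map, List.getElem?_eq_getElem hkl]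
    simp only [Option.map_some, Option.getD_some]
    rw [← hkr, List.getElem_take]
  have hex : ∃ p ∈ pvP table languages preference 0 ::
      ([1, 2, 3, 4] : List Int).map (pvP table languages preference), 0 ≤ p.1 := by
    have hmem : ((k : Nat) : Int) ∈ ([0, 1, 2, 3, 4] : List Int) := by
      interval_cases k <;> simp
    have hsc : 0 ≤ (pvP table languages preference ((k : Nat) : Int)).1 := by
      show 0 ≤ scoreA languages preference (pvRow table ((k : Nat) : Int))
      rw [hrowk, scoreA_eq_rowScoreB, rowScoreB_eq_pre]
      exact hscore
    refine ⟨pvP table languages preference ((k : Nat) : Int), ?_, hsc⟩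
    have := List.mem_map_of_mem (f := pvP table languages preference) hmem
    simpa using this
  -- both loops now reduce to the outer lemma
  conv_rhs => rw [List.map_cons, List.foldl_cons]
  rw [show stepOpt none ((-(pvP table languages preference 0).1,
      (pvP table languages preference 0).2)) = some ((-(pvP table languages preference 0).1,
      (pvP table languages preference 0).2)) from by simp only [stepOpt]]
  rw [optFold, Option.getD_some]
  conv_lhs => rw [List.map_cons]
  rw [outer (pvP table languages preference 0)
      (([1, 2, 3, 4] : List Int).map (pvP table languages preference)) hex]
  simp
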